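-- pv_equiv track=rewrite | github.com/UBC-STAT-IT/course-mapper | python_scripts/arrange_hierarchical.py | build_prereq_graph
-- ===== SOURCE A (Python) =====
-- from collections import defaultdict
--
-- def build_prereq_graph(course_requisites, courses):
--     course_set = {c['course_number'] for c in courses}
--     prereqs = defaultdict(set)
--     for req in course_requisites:
--         course = req['course_number']
--         prereq = req['requisite_number']
--         if course in course_set and prereq in course_set:
--             prereqs[course].add(prereq)
--     return prereqs
-- ===== SOURCE B (Python) =====
-- from collections import defaultdict
--
-- def build_prereq_graph(course_requisites, courses):
--     course_set = {c['course_number'] for c in courses}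
--     valid = [(r['course_number'], r['requisite_number']) for r in course_requisites
--              if r['course_number'] in course_set and r['requisite_number'] in course_set]
--     prereqs = defaultdict(set)
--     for course in dict.fromkeys(c for c, _ in valid):
--         prereqs[course] = {p for c, p in valid if c == course}
--     return prereqs
-- ===== Notes on version B (the rewrite author's own statement) =====
-- stated objective: alternative
-- what changed: Replaces A's single pass that accumulates into a defaultdict under a validity guard by a pipeline: first filter the requisite edges to the valid ones, then iterate over the distinct courses (first-appearance order) building each prerequisite set by a per-course comprehension over the filtered edge list.
import Mathlib
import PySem

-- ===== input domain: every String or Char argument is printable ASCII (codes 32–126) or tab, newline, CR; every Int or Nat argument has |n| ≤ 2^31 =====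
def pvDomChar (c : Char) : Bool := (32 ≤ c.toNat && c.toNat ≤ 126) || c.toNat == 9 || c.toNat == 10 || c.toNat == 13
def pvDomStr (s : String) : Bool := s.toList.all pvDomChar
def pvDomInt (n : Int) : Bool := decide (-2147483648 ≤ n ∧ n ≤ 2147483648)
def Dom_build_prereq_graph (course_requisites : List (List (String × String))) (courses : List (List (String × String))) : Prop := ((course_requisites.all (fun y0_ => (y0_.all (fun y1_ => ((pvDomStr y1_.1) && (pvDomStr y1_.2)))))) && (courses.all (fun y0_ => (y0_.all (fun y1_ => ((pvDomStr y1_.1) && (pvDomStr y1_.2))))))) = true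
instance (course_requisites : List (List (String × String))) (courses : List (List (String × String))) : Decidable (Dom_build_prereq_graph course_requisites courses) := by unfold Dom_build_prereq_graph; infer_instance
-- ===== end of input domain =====

-- B replaces A's guarded single-pass defaultdict accumulation by a filter-then-group pipeline
-- (filter the valid edges once, then build each course's prerequisite set by a per-course scan);
-- objective: alternative decomposition, not faster.

-- shared helper: r['key'] on an association list (first match); total form, exact under Pre_
def pvLookup (r : List (String × String)) (k : String) : String :=
  ((PySem.Dict.mk r).get? k).getD ""

-- ===== PORT A =====
def build_prereq_graph (course_requisites : List (List (String × String))) (courses : List (List (String × String))) : List (String × List String) :=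
  let course_set : PySem.Set String :=
    PySem.Set.ofList (courses.map (fun c => pvLookup c "course_number"))
  (course_requisites.foldl
    (fun (prereqs : PySem.Dict String (PySem.Set String)) req =>
      let course := pvLookup req "course_number"
      let prereq := pvLookup req "requisite_number"
      if course_set.contains course && course_set.contains prereq then
        prereqs.modify course PySem.Set.empty (fun s => s.add prereq)
      else prereqs)
    PySem.Dict.empty).items

-- ===== PORT B =====
def build_prereq_graph_alt (course_requisites : List (List (String × String))) (courses : List (List (String × String))) : List (String × List String) :=
  let course_set : PySem.Set String :=
    PySem.Set.ofList (courses.map (fun c => pvLookup c "course_number"))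
  let valid : List (String × String) := course_requisites.filterMap (fun r =>
    let c := pvLookup r "course_number"
    let p := pvLookup r "requisite_number"
    if course_set.contains c && course_set.contains p then some (c, p) else none)
  (PySem.List.dedup (valid.map (·.1))).map (fun course =>
    (course, PySem.Set.ofList ((valid.filter (fun e => e.1 == course)).map (·.2))))

-- ===== PRECONDITION & SPEC =====
-- Pre_ excludes exactly the inputs where the Python raises KeyError: some requisite record
-- lacks a 'course_number'/'requisite_number' key, or some course record lacks 'course_number'.
def Pre_build_prereq_graph (course_requisites : List (List (String × String))) (courses : List (List (String × String))) : Prop :=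
  (course_requisites.all (fun r => r.any (fun p => p.1 == "course_number") && r.any (fun p => p.1 == "requisite_number"))
    && courses.all (fun c => c.any (fun p => p.1 == "course_number"))) = true
instance (course_requisites : List (List (String × String))) (courses : List (List (String × String))) : Decidable (Pre_build_prereq_graph course_requisites courses) := by unfold Pre_build_prereq_graph; infer_instance
def pvWitness_build_prereq_graph : (List (List (String × String))) × (List (List (String × String))) :=
  ([[("course_number", "A"), ("requisite_number", "B")]],
   [[("course_number", "A")], [("course_number", "B")]])
def Spec_build_prereq_graph (course_requisites : List (List (String × String))) (courses : List (List (String × String))) (out : List (String × List String)) : Prop := out = build_prereq_graph_alt course_requisites courses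
instance (course_requisites : List (List (String × String))) (courses : List (List (String × String))) (out : List (String × List String)) : Decidable (Spec_build_prereq_graph course_requisites courses out) := by unfold Spec_build_prereq_graph; infer_instance

-- ===== CLAIM (what is proved, stated in full; the proofs are below) =====
def Claim_equal_build_prereq_graph : Prop := ∀ (course_requisites : List (List (String × String))) (courses : List (List (String × String))), Dom_build_prereq_graph course_requisites courses → Pre_build_prereq_graph course_requisites courses → Spec_build_prereq_graph course_requisites courses (build_prereq_graph course_requisites courses)

-- ===== LEMMAS AND PROOFS =====

-- A's guarded fold over all requisites equals the modify-fold over the filtered edge list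
theorem pv_foldl_guard_filterMap (S : PySem.Set String) (crs : List (List (String × String)))
    (d : PySem.Dict String (PySem.Set String)) :
    crs.foldl
      (fun prereqs req =>
        let course := pvLookup req "course_number"
        let prereq := pvLookup req "requisite_number"
        if S.contains course && S.contains prereq then
          prereqs.modify course PySem.Set.empty (fun s => s.add prereq)
        else prereqs) d
    = (crs.filterMap (fun r =>
        let c := pvLookup r "course_number"
        let p := pvLookup r "requisite_number"
        if S.contains c && S.contains p then some (c, p) else none)).foldl
        (fun prereqs e => prereqs.modify e.1 PySem.Set.empty (fun s => s.add e.2)) d := by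
  induction crs generalizing d with
  | nil => rfl
  | cons r rest ih =>
    simp only [List.foldl_cons, List.filterMap_cons]
    by_cases h : (S.contains (pvLookup r "course_number") && S.contains (pvLookup r "requisite_number")) = true
    · simp only [h, if_true]; exact ih _
    · simp only [eq_false_of_ne_true h, if_false, Bool.false_eq_true]; exact ih _

-- getD of the modify/Set.add fold: the accumulated value at key c is the starting value
-- updated with the second components of the edges whose first component is c
theorem pv_getD_foldl_modify_setadd (l : List (String × String))
    (d : PySem.Dict String (PySem.Set String)) (c : String) :
    (l.foldl (fun prereqs e => prereqs.modify e.1 PySem.Set.empty (fun s => s.add e.2)) d).getD c PySem.Set.empty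
    = PySem.Set.update (d.getD c PySem.Set.empty) ((l.filter (fun e => e.1 == c)).map (·.2)) := by
  induction l generalizing d with
  | nil => rfl
  | cons e rest ih =>
    simp only [List.foldl_cons, List.filter_cons]
    by_cases h : e.1 = c
    · subst h
      simp only [BEq.rfl, if_true, List.map_cons, ih]
      rw [PySem.Dict.getD_modify_self]
      rfl
    · have hbe : (e.1 == c) = false := by simp [h]
      simp only [hbe, Bool.false_eq_true, if_false, ih]
      rw [PySem.Dict.getD_modify, if_neg (fun hc : c = e.1 => h hc.symm)]

theorem build_prereq_graph_eq (crs courses : List (List (String × String))) :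
    build_prereq_graph crs courses = build_prereq_graph_alt crs courses := by
  unfold build_prereq_graph build_prereq_graph_alt
  simp only []
  rw [pv_foldl_guard_filterMap]
  set S : PySem.Set String := PySem.Set.ofList (courses.map (fun c => pvLookup c "course_number")) with hS
  set valid : List (String × String) := crs.filterMap (fun r =>
    let c := pvLookup r "course_number"
    let p := pvLookup r "requisite_number"
    if S.contains c && S.contains p then some (c, p) else none) with hv
  set D := valid.foldl (fun prereqs e => prereqs.modify e.1 PySem.Set.empty (fun s => s.add e.2)) PySem.Dict.empty with hD
  have hkeys : D.keys = PySem.Set.ofList (valid.map (·.1)) := by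
    rw [hD, PySem.Dict.keys_foldl_modify_key]
    simp [PySem.Set.update, PySem.Set.ofList_eq_foldl, PySem.Dict.keys_empty]
  have hnd : D.keys.Nodup := by
    rw [hkeys]; exact PySem.Set.nodup_ofList _
  rw [PySem.Dict.items_eq_map_keys D hnd PySem.Set.empty, hkeys]
  rw [PySem.List.dedup_eq_ofList]
  refine List.map_congr_left (fun c _ => ?_)
  rw [hD, pv_getD_foldl_modify_setadd]
  rw [PySem.Dict.getD_empty]
  simp [PySem.Set.empty, PySem.Set.update, PySem.Set.ofList_eq_foldl]

-- ===== VERDICT (by name: the statement is the Claim_ definition above) =====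
theorem build_prereq_graph_spec : Claim_equal_build_prereq_graph := by
  intro crs courses _ _
  unfold Spec_build_prereq_graph
  exact build_prereq_graph_eq crs courses
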